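-- pv_equiv track=rewrite | github.com/bog-walk/project-euler-python | solution/batch9/problem100.py | get_next_half_arrangement
-- ===== SOURCE A (Python) =====
-- from math import isqrt, sqrt
--
-- def get_next_half_arrangement(limit: int) -> tuple[str, str]:
--     """
--     Original PE problem (p = 1/2) results in a known integer sequence of
--     blueDiscs based on the solution to X(X-1) = 2b(b-1), such that:
--
--             when p = 1/2 -> b(n) = 6b(n-1) - b(n-2) - 2, with b(0) = 1, b(1) = 3
--
--     Some other fractions can be observed to follow a similar pattern:
--
--             when p = 3/4 -> b(n) = 14b(n-1) - b(n-2) - 6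
--             when p = 5/7 -> b(n) = 12b(n-1) - b(n-2) - 5
--
--     see here: https://oeis.org/A011900
--     """
--
--     if limit <= 3:
--         return "3", "4"
--
--     blue_n_minus_2, blue_n_minus_1 = 1, 3
--
--     while True:
--         blue_discs = 6 * blue_n_minus_1 - blue_n_minus_2 - 2
--         rhs = 2 * blue_discs * (blue_discs - 1)
--         root = isqrt(1 + 4 * rhs)
--         total_discs = (1 + root) // 2
--         blue_n_minus_2, blue_n_minus_1 = blue_n_minus_1, blue_discs
--         if total_discs > limit:
--             break
--
--     return str(blue_discs), str(total_discs)
-- ===== SOURCE B (Python) =====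
-- def get_next_half_arrangement(limit: int) -> tuple[str, str]:
--     # Walk the exact Pell-equation solutions (2t-1)^2 - 2(2b-1)^2 = -1 with the
--     # one-step transformation (b, t) -> (3b + 2t - 2, 4b + 3t - 3), starting from
--     # the smallest solution (3, 4); no isqrt and no second-order recurrence needed.
--     if limit <= 3:
--         return "3", "4"
--     blue, total = 3, 4
--     while total <= limit:
--         blue, total = 3 * blue + 2 * total - 2, 4 * blue + 3 * total - 3
--     return str(blue), str(total)
-- ===== Notes on version B (the rewrite author's own statement) =====
-- stated objective: simpler
-- what changed: B replaces the second-order blue recurrence plus isqrt back-derivation of the total by a single first-order Pell step (b,t)->(3b+2t-2,4b+3t-3) on one (blue,total) pair, keeping no two-term history and never taking a square root.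
import Mathlib
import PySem

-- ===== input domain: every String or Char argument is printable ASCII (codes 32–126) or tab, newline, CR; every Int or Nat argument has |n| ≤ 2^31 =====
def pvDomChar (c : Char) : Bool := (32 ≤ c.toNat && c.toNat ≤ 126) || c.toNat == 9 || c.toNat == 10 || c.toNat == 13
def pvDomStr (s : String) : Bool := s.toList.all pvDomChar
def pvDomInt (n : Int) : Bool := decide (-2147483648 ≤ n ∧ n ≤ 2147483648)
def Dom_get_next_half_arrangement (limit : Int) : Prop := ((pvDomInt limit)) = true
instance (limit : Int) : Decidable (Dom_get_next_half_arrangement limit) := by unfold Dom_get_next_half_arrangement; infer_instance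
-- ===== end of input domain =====

-- B replaces A's second-order blue recurrence + isqrt back-derivation of the total by a
-- single first-order Pell step (b,t) -> (3b+2t-2, 4b+3t-3) on one (blue,total) pair (simpler).

-- ===== PORT A =====

-- hand port of math.isqrt: exact for n ≥ 0 (the only arguments it receives in this program)
def pyIsqrt (n : Int) : Int := (Nat.sqrt n.toNat : Int)

-- cited by loopA's decreasing_by: the derived total is at least the current blue count
lemma pv_total_ge_blue (blue : Int) (hb : 1 ≤ blue) :
    blue ≤ PySem.Int.floordiv (1 + pyIsqrt (1 + 4 * (2 * blue * (blue - 1)))) 2 := by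
  have hroot : 2 * blue - 1 ≤ pyIsqrt (1 + 4 * (2 * blue * (blue - 1))) := by
    unfold pyIsqrt
    have h1 : ((2 * blue - 1).toNat : Int) = 2 * blue - 1 := Int.toNat_of_nonneg (by omega)
    have h2 : (((1 + 4 * (2 * blue * (blue - 1))).toNat : Int)) = 1 + 4 * (2 * blue * (blue - 1)) :=
      Int.toNat_of_nonneg (by nlinarith)
    have hle : (2 * blue - 1).toNat ≤ Nat.sqrt (1 + 4 * (2 * blue * (blue - 1))).toNat := by
      rw [Nat.le_sqrt]
      have : ((2 * blue - 1).toNat * (2 * blue - 1).toNat : Int)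
          ≤ ((1 + 4 * (2 * blue * (blue - 1))).toNat : Int) := by
        rw [h1, h2]; nlinarith
      exact_mod_cast this
    omega
  rw [PySem.Int.le_floordiv_iff_mul_le (by norm_num)]
  omega

-- the while-loop of A; the proof argument only carries the loop invariant needed for termination
def loopA (limit b2 b1 : Int) (h : 1 ≤ b2 ∧ b2 < b1) : String × String :=
  let blue := 6 * b1 - b2 - 2
  let rhs := 2 * blue * (blue - 1)
  let root := pyIsqrt (1 + 4 * rhs)
  let total := PySem.Int.floordiv (1 + root) 2
  if total > limit then (PySem.Int.toStr blue, PySem.Int.toStr total)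
  else loopA limit b1 blue ⟨by omega, by omega⟩
termination_by (limit + 1 - b1).toNat
decreasing_by
  have := pv_total_ge_blue (6 * b1 - b2 - 2) (by omega)
  simp only [blue, rhs, root, total] at *
  omega

def get_next_half_arrangement (limit : Int) : String × String :=
  if limit ≤ 3 then ("3", "4")
  else loopA limit 1 3 ⟨by norm_num, by norm_num⟩

-- ===== PORT B =====

-- the while-loop of B; the proof argument only carries positivity, needed for termination
def loopB (limit b t : Int) (h : 1 ≤ b ∧ 1 ≤ t) : String × String :=
  if t ≤ limit then
    loopB limit (3 * b + 2 * t - 2) (4 * b + 3 * t - 3) ⟨by omega, by omega⟩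
  else (PySem.Int.toStr b, PySem.Int.toStr t)
termination_by (limit + 1 - t).toNat
decreasing_by omega

def get_next_half_arrangement_alt (limit : Int) : String × String :=
  if limit ≤ 3 then ("3", "4")
  else loopB limit 3 4 ⟨by norm_num, by norm_num⟩

-- ===== PRECONDITION & SPEC =====
def Spec_get_next_half_arrangement (limit : Int) (out : String × String) : Prop := out = get_next_half_arrangement_alt limit
instance (limit : Int) (out : String × String) : Decidable (Spec_get_next_half_arrangement limit out) := by unfold Spec_get_next_half_arrangement; infer_instance

-- ===== CLAIM (what is proved, stated in full; the proofs are below) =====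
def Claim_equal_get_next_half_arrangement : Prop := ∀ (limit : Int), Dom_get_next_half_arrangement limit → Spec_get_next_half_arrangement limit (get_next_half_arrangement limit)

-- ===== LEMMAS AND PROOFS =====

lemma pyIsqrt_sq (x : Int) (hx : 0 ≤ x) : pyIsqrt (x * x) = x := by
  unfold pyIsqrt
  have h1 : (x * x).toNat = x.toNat * x.toNat := by
    rcases Int.eq_ofNat_of_zero_le hx with ⟨k, rfl⟩
    exact_mod_cast rfl
  have h2 : x.toNat * x.toNat = x.toNat ^ 2 := (sq x.toNat).symm
  rw [h1, h2, Nat.sqrt_eq']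
  exact Int.toNat_of_nonneg hx

lemma floordiv_two_mul (t : Int) : PySem.Int.floordiv (2 * t) 2 = t := by
  rw [PySem.Int.floordiv_eq_iff_of_pos (by norm_num)]
  omega

-- x ≥ y for a positive Pell solution x^2 - 2 y^2 = -1
lemma pell_t_ge_b (b t : Int) (hb : 1 ≤ b) (ht : 1 ≤ t)
    (hpell : (2 * t - 1) * (2 * t - 1) - 2 * ((2 * b - 1) * (2 * b - 1)) = -1) : b ≤ t := by
  nlinarith

-- A's isqrt-derived (blue, total) coincides with B's Pell state, step for step
lemma loop_eq (n : Nat) :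
    ∀ (limit b2 b1 : Int) (hA : 1 ≤ b2 ∧ b2 < b1) (b t : Int) (hB : 1 ≤ b ∧ 1 ≤ t),
      (limit + 1 - b1).toNat ≤ n →
      (2 * t - 1) * (2 * t - 1) - 2 * ((2 * b - 1) * (2 * b - 1)) = -1 →
      3 * (2 * b - 1) - 2 * (2 * t - 1) = 2 * b1 - 1 →
      2 * b - 1 = 6 * (2 * b1 - 1) - (2 * b2 - 1) →
      loopA limit b2 b1 hA = loopB limit b t hB := by
  induction n with
  | zero =>
    intro limit b2 b1 hA b t hB hm hpell hc1 hc2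
    have hb : 6 * b1 - b2 - 2 = b := by omega
    have htb : b ≤ t := pell_t_ge_b b t (by omega) (by omega) hpell
    have hsq : 1 + 4 * (2 * b * (b - 1)) = (2 * t - 1) * (2 * t - 1) := by nlinarith
    have htot : PySem.Int.floordiv (1 + pyIsqrt (1 + 4 * (2 * b * (b - 1)))) 2 = t := by
      rw [hsq, pyIsqrt_sq _ (by omega)]
      have h2t : 1 + (2 * t - 1) = 2 * t := by ring
      rw [h2t, floordiv_two_mul]
    rw [loopA, loopB]
    simp only [hb, htot]
    rw [if_pos (by omega), if_neg (by omega)]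
  | succ n ih =>
    intro limit b2 b1 hA b t hB hm hpell hc1 hc2
    have hb : 6 * b1 - b2 - 2 = b := by omega
    have htb : b ≤ t := pell_t_ge_b b t (by omega) (by omega) hpell
    have hsq : 1 + 4 * (2 * b * (b - 1)) = (2 * t - 1) * (2 * t - 1) := by nlinarith
    have htot : PySem.Int.floordiv (1 + pyIsqrt (1 + 4 * (2 * b * (b - 1)))) 2 = t := by
      rw [hsq, pyIsqrt_sq _ (by omega)]
      have h2t : 1 + (2 * t - 1) = 2 * t := by ring
      rw [h2t, floordiv_two_mul]
    rw [loopA, loopB]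
    simp only [hb, htot]
    by_cases hcond : t > limit
    · rw [if_pos hcond, if_neg (by omega)]
    · rw [if_neg hcond, if_pos (by omega)]
      exact ih limit b1 b ⟨by omega, by omega⟩ (3 * b + 2 * t - 2) (4 * b + 3 * t - 3)
        ⟨by omega, by omega⟩ (by omega)
        (by linear_combination hpell) (by omega) (by omega)

-- ===== VERDICT (by name: the statement is the Claim_ definition above) =====
theorem get_next_half_arrangement_spec : Claim_equal_get_next_half_arrangement := by
  unfold Claim_equal_get_next_half_arrangement
  intro limit _
  unfold Spec_get_next_half_arrangement get_next_half_arrangement get_next_half_arrangement_alt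
  by_cases h3 : limit ≤ 3
  · rw [if_pos h3, if_pos h3]
  · rw [if_neg h3, if_neg h3]
    rw [loopB]
    rw [if_pos (by omega)]
    exact loop_eq (limit + 1 - 3).toNat limit 1 3 ⟨by norm_num, by norm_num⟩ 15 21
      ⟨by norm_num, by norm_num⟩ (by omega) (by norm_num) (by norm_num) (by norm_num)
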